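-- pv_equiv track=rewrite | github.com/dunhlee/CA5 | DP.py | valid_coverage
-- ===== SOURCE A (Python) =====
-- def valid_coverage(cities, towers, i, k, d):
--     if k == -1: # k is -1 when initializing base cases DP[i][1]
--         if cities[0] >= towers[i-1] - d:
--             return True
--         else:
--             return False
--     else:
--         for city in cities: # check to see if a city is overlapped by tower i and tower k (tower k is the tower prior to i)
--             if abs(city - towers[i-1]) <= d and abs(city - towers[k-1]) <= d:
--                 return False
--         return True
-- ===== SOURCE B (Python) =====
-- def valid_coverage(cities, towers, i, k, d):
--     if k == -1:
--         return cities[0] >= towers[i - 1] - d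
--     ti = towers[i - 1]
--     tk = towers[k - 1]
--     lo = max(ti, tk) - d          # intersection of the two coverage intervals
--     hi = min(ti, tk) + d
--     s = sorted(cities)
--     a, b = 0, len(s)
--     while a < b:                  # leftmost index with s[a] >= lo
--         m = (a + b) // 2
--         if s[m] < lo:
--             a = m + 1
--         else:
--             b = m
--     return not (a < len(s) and s[a] <= hi)
-- ===== Notes on version B (the rewrite author's own statement) =====
-- stated objective: alternative
-- what changed: B computes the two towers' coverage-interval intersection [max-d, min+d] once and binary-searches a sorted copy of cities for an element in it, instead of A's linear scan testing two absolute-value conditions per city.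
-- outside the precondition, e.g. on valid_coverage([5], [0], 1, 9, -1): A returns True, B raises IndexError; on valid_coverage([], [0], 5, 3, 0): A returns True, B raises IndexError
import Mathlib
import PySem

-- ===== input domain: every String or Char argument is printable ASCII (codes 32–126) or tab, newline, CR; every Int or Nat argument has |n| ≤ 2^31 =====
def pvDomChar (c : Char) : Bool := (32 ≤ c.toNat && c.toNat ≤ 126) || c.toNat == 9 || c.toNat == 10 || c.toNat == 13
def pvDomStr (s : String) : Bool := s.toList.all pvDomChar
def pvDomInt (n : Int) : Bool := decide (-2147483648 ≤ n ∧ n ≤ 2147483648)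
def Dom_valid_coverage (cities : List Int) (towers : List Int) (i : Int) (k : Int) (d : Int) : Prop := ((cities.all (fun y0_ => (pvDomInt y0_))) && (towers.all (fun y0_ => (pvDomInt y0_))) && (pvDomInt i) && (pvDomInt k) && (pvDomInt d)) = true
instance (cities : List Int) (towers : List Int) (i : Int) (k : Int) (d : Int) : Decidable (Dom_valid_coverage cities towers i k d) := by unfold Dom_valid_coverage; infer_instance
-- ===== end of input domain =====

-- B replaces A's per-city two-absolute-value scan by one interval intersection plus a
-- binary search over a sorted copy of cities (alternative algorithm, not claimed faster).


-- ===== PORT A =====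
-- A's for-loop; Python's `and` short-circuits, so towers[k-1] is only read when
-- the first abs-condition holds (exact via pyGet?; none = IndexError, excluded by Pre_).
def pvLoopA (cs : List Int) (towers : List Int) (i : Int) (k : Int) (d : Int) : Bool :=
  match cs with
  | [] => true
  | c :: rest =>
    match PySem.List.pyGet? towers (i - 1) with
    | some ti =>
      if |c - ti| ≤ d then
        match PySem.List.pyGet? towers (k - 1) with
        | some tk => if |c - tk| ≤ d then false else pvLoopA rest towers i k d
        | none => false
      else pvLoopA rest towers i k d
    | none => false

def valid_coverage (cities : List Int) (towers : List Int) (i : Int) (k : Int) (d : Int) : Bool :=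
  if k = -1 then
    match PySem.List.pyGet? cities 0, PySem.List.pyGet? towers (i - 1) with
    | some c0, some ti => decide (c0 ≥ ti - d)
    | _, _ => false
  else pvLoopA cities towers i k d

-- ===== PORT B =====
-- Source B's hand-written while loop: leftmost index a in s with s[a] >= lo
-- (s[m] accessed at a Nat index that stays in range, ported as getD).
def pvBsearch (s : List Int) (lo : Int) (a : Nat) (b : Nat) : Nat :=
  if a < b then
    if s.getD ((a + b) / 2) 0 < lo then pvBsearch s lo ((a + b) / 2 + 1) b
    else pvBsearch s lo a ((a + b) / 2)
  else a
termination_by b - a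
decreasing_by all_goals omega

def valid_coverage_alt (cities : List Int) (towers : List Int) (i : Int) (k : Int) (d : Int) : Bool :=
  if k = -1 then
    match PySem.List.pyGet? cities 0 with
    | none => false
    | some c0 =>
      match PySem.List.pyGet? towers (i - 1) with
      | none => false
      | some ti => decide (c0 ≥ ti - d)
  else
    match PySem.List.pyGet? towers (i - 1) with
    | none => false
    | some ti =>
      match PySem.List.pyGet? towers (k - 1) with
      | none => false
      | some tk =>
        let lo := max ti tk - d
        let hi := min ti tk + d
        let s := PySem.List.sorted cities (fun x => x) false
        let a := pvBsearch s lo 0 s.length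
        !(decide (a < s.length) && decide (s.getD a 0 ≤ hi))

-- ===== PRECONDITION & SPEC =====
-- Pre_ excludes out-of-range tower indices (and an empty cities list when k = -1):
-- there A raises IndexError, except that A still returns True when the empty city list or
-- `and`-short-circuiting skips the read of towers[k-1] — B reads both towers up front and raises.
def Pre_valid_coverage (cities : List Int) (towers : List Int) (i : Int) (k : Int) (d : Int) : Prop :=
  if k = -1 then cities ≠ [] ∧ PySem.Raise.InRange towers.length (i - 1)
  else PySem.Raise.InRange towers.length (i - 1) ∧ PySem.Raise.InRange towers.length (k - 1)
instance (cities : List Int) (towers : List Int) (i : Int) (k : Int) (d : Int) : Decidable (Pre_valid_coverage cities towers i k d) := by unfold Pre_valid_coverage; infer_instance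

def pvWitness_valid_coverage : List Int × List Int × Int × Int × Int := ([3, 7], [0, 5], 1, 2, 2)

def Spec_valid_coverage (cities : List Int) (towers : List Int) (i : Int) (k : Int) (d : Int) (out : Bool) : Prop := out = valid_coverage_alt cities towers i k d
instance (cities : List Int) (towers : List Int) (i : Int) (k : Int) (d : Int) (out : Bool) : Decidable (Spec_valid_coverage cities towers i k d out) := by unfold Spec_valid_coverage; infer_instance

-- ===== CLAIM (what is proved, stated in full; the proofs are below) =====
def Claim_equal_valid_coverage : Prop := ∀ (cities : List Int) (towers : List Int) (i : Int) (k : Int) (d : Int), Dom_valid_coverage cities towers i k d → Pre_valid_coverage cities towers i k d → Spec_valid_coverage cities towers i k d (valid_coverage cities towers i k d)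

-- ===== LEMMAS AND PROOFS =====

theorem pvWitness_ok : Dom_valid_coverage pvWitness_valid_coverage.1 pvWitness_valid_coverage.2.1 pvWitness_valid_coverage.2.2.1 pvWitness_valid_coverage.2.2.2.1 pvWitness_valid_coverage.2.2.2.2 ∧ Pre_valid_coverage pvWitness_valid_coverage.1 pvWitness_valid_coverage.2.1 pvWitness_valid_coverage.2.2.1 pvWitness_valid_coverage.2.2.2.1 pvWitness_valid_coverage.2.2.2.2 := by
  decide

-- A's loop is the negation of "some city lies in both coverage intervals".
theorem pvLoopA_eq_any (cs towers : List Int) (i k d ti tk : Int)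
    (hi : PySem.List.pyGet? towers (i - 1) = some ti)
    (hk : PySem.List.pyGet? towers (k - 1) = some tk) :
    pvLoopA cs towers i k d
      = !(cs.any fun c => decide (max ti tk - d ≤ c ∧ c ≤ min ti tk + d)) := by
  induction cs with
  | nil => simp [pvLoopA]
  | cons c rest ih =>
    by_cases h1 : |c - ti| ≤ d
    · by_cases h2 : |c - tk| ≤ d
      · have hP : max ti tk - d ≤ c ∧ c ≤ min ti tk + d := by
          rw [abs_le] at h1 h2; omega
        rw [List.any_cons, decide_eq_true hP, Bool.true_or, Bool.not_true]
        simp [pvLoopA, hi, hk, h1, h2]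
      · have hP : ¬ (max ti tk - d ≤ c ∧ c ≤ min ti tk + d) := by
          rw [abs_le] at h1; rw [abs_le] at h2; omega
        rw [List.any_cons, decide_eq_false hP, Bool.false_or, ← ih]
        simp [pvLoopA, hi, hk, h1, h2]
    · have hP : ¬ (max ti tk - d ≤ c ∧ c ≤ min ti tk + d) := by
        rw [abs_le] at h1; omega
      rw [List.any_cons, decide_eq_false hP, Bool.false_or, ← ih]
      simp [pvLoopA, hi, h1]

-- getD monotone on a (≤)-pairwise list
theorem pvSorted_getD_le (s : List Int) (hs : s.Pairwise (· ≤ ·)) (p q : Nat)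
    (hpq : p ≤ q) (hq : q < s.length) : s.getD p 0 ≤ s.getD q 0 := by
  rcases Nat.eq_or_lt_of_le hpq with rfl | hlt
  · exact le_refl _
  · have hp : p < s.length := lt_trans hlt hq
    rw [List.getD_eq_getElem s 0 hp, List.getD_eq_getElem s 0 hq]
    exact List.pairwise_iff_getElem.mp hs p q hp hq hlt

-- binary-search invariant
theorem pvBsearch_spec (s : List Int) (hs : s.Pairwise (· ≤ ·)) (lo : Int) :
    ∀ (a b : Nat), a ≤ b → b ≤ s.length →
    (∀ j, j < a → s.getD j 0 < lo) →
    (∀ j, b ≤ j → j < s.length → lo ≤ s.getD j 0) →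
    (∀ j, j < pvBsearch s lo a b → s.getD j 0 < lo) ∧
    (∀ j, pvBsearch s lo a b ≤ j → j < s.length → lo ≤ s.getD j 0) := by
  intro a b
  induction a, b using pvBsearch.induct s lo with
  | case1 a b hab hlt ih =>
    intro _ hb hleft hright
    rw [pvBsearch, if_pos hab, if_pos hlt]
    refine ih (by omega) hb ?_ hright
    intro j hj
    rcases Nat.lt_or_ge j a with h | h
    · exact hleft j h
    · exact lt_of_le_of_lt (pvSorted_getD_le s hs j ((a+b)/2) (by omega) (by omega)) hlt
  | case2 a b hab hge ih =>
    intro _ hb hleft hright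
    rw [pvBsearch, if_pos hab, if_neg hge]
    refine ih (by omega) (by omega) hleft ?_
    intro j hj hjlen
    exact le_trans (not_lt.mp hge) (pvSorted_getD_le s hs ((a+b)/2) j hj hjlen)
  | case3 a b hab =>
    intro hab' _ hleft hright
    rw [pvBsearch, if_neg hab]
    have hba : a = b := Nat.le_antisymm hab' (Nat.not_lt.mp hab)
    subst hba
    exact ⟨hleft, hright⟩

-- characterisation: the binary search answers the interval-membership query
theorem pvBsearch_mem_iff (s : List Int) (hs : s.Pairwise (· ≤ ·)) (lo hi : Int) :
    (∃ c ∈ s, lo ≤ c ∧ c ≤ hi)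
      ↔ (pvBsearch s lo 0 s.length < s.length ∧ s.getD (pvBsearch s lo 0 s.length) 0 ≤ hi) := by
  obtain ⟨hL, hR⟩ := pvBsearch_spec s hs lo 0 s.length (Nat.zero_le _) (le_refl _)
    (by intro j hj; omega) (by intro j hj hjl; omega)
  set r := pvBsearch s lo 0 s.length with hr
  constructor
  · rintro ⟨c, hc, hlo, hhi⟩
    obtain ⟨j, hj, rfl⟩ := List.getElem_of_mem hc
    have hjD : s.getD j 0 = s[j] := List.getD_eq_getElem s 0 hj
    have hjr : r ≤ j := by
      by_contra h
      have := hL j (by omega)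
      omega
    refine ⟨lt_of_le_of_lt hjr hj, ?_⟩
    calc s.getD r 0 ≤ s.getD j 0 := pvSorted_getD_le s hs r j hjr hj
      _ ≤ hi := by omega
  · rintro ⟨hrl, hrhi⟩
    refine ⟨s.getD r 0, ?_, hR r (le_refl _) hrl, hrhi⟩
    rw [List.getD_eq_getElem s 0 hrl]
    exact List.getElem_mem hrl

-- ===== VERDICT (by name: the statement is the Claim_ definition above) =====
theorem valid_coverage_spec : Claim_equal_valid_coverage := by
  intro cities towers i k d _ hpre
  unfold Spec_valid_coverage valid_coverage valid_coverage_alt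
  by_cases hk : k = -1
  · simp only [hk, reduceIte]
    cases PySem.List.pyGet? cities 0 <;> cases PySem.List.pyGet? towers (i - 1) <;> rfl
  · simp only [if_neg hk]
    unfold Pre_valid_coverage at hpre
    rw [if_neg hk] at hpre
    obtain ⟨h1, h2⟩ := hpre
    obtain ⟨ti, hti⟩ : ∃ t, PySem.List.pyGet? towers (i - 1) = some t := by
      cases hgi : PySem.List.pyGet? towers (i - 1) with
      | none => exact absurd h1 (Iff.mp (PySem.List.pyGet?_eq_none_iff towers (i - 1)) hgi)
      | some t => exact ⟨t, rfl⟩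
    obtain ⟨tk, htk⟩ : ∃ t, PySem.List.pyGet? towers (k - 1) = some t := by
      cases hgk : PySem.List.pyGet? towers (k - 1) with
      | none => exact absurd h2 (Iff.mp (PySem.List.pyGet?_eq_none_iff towers (k - 1)) hgk)
      | some t => exact ⟨t, rfl⟩
    rw [hti, htk, pvLoopA_eq_any cities towers i k d ti tk hti htk]
    set s := PySem.List.sorted cities (fun x => x) false with hsdef
    have hperm : s.Perm cities := PySem.List.sorted_perm cities (fun x => x) false
    have hpw : s.Pairwise (· ≤ ·) := by
      have := PySem.List.sorted_pairwise cities (fun x => x)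
      simpa using this
    have hmem := pvBsearch_mem_iff s hpw (max ti tk - d) (min ti tk + d)
    have hany : (cities.any fun c => decide (max ti tk - d ≤ c ∧ c ≤ min ti tk + d))
        = decide (pvBsearch s (max ti tk - d) 0 s.length < s.length
                  ∧ s.getD (pvBsearch s (max ti tk - d) 0 s.length) 0 ≤ min ti tk + d) := by
      apply Bool.eq_iff_iff.mpr
      rw [List.any_eq_true, decide_eq_true_eq]
      constructor
      · rintro ⟨c, hc, hcc⟩
        exact hmem.mp ⟨c, hperm.mem_iff.mpr hc, of_decide_eq_true hcc⟩
      · intro h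
        obtain ⟨c, hcs, hcc⟩ := hmem.mpr h
        exact ⟨c, hperm.mem_iff.mp hcs, decide_eq_true hcc⟩
    rw [hany]
    simp
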